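-- pv_equiv track=rewrite | github.com/soyukke/lean-unsolved | scripts/collatz_DN_scaling.py | compute_DN
-- ===== SOURCE A (Python) =====
-- def stopping_time(n):
--     """コラッツ停止時間: n が 1 に到達するまでのステップ数"""
--     count = 0
--     while n != 1:
--         if n % 2 == 0:
--             n //= 2
--         else:
--             n = 3 * n + 1
--         count += 1
--     return count
--
-- def compute_DN(N_max, checkpoints):
--     """D(N) を漸進的に計算"""
--     results = {}
--     current_max_st = 0
--     cp_set = set(checkpoints)
--
--     for n in range(1, N_max + 1):
--         st = stopping_time(n)
--         if st > current_max_st: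
--             current_max_st = st
--         if n in cp_set:
--             results[n] = current_max_st
--
--     return results
-- ===== SOURCE B (Python) =====
-- def stopping_time(n):
--     """コラッツ停止時間: n が 1 に到達するまでのステップ数"""
--     count = 0
--     while n != 1:
--         if n % 2 == 0:
--             n //= 2
--         else:
--             n = 3 * n + 1
--         count += 1
--     return count
--
-- def compute_DN(N_max, checkpoints):
--     """D(N): sorted in-range checkpoints, running max per segment; stops at the last checkpoint"""
--     results = {}
--     cps = sorted({c for c in checkpoints if 1 <= c <= N_max})
--     prev = 1
--     cur = 0
--     for c in cps:
--         for n in range(prev, c + 1):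
--             st = stopping_time(n)
--             if st > cur:
--                 cur = st
--         results[c] = cur
--         prev = c + 1
--     return results
-- ===== Notes on version B (the rewrite author's own statement) =====
-- stated objective: alternative
-- what changed: Instead of scanning every n in 1..N_max with a per-n set-membership test and a running max, B sorts the distinct in-range checkpoints once and computes the running maximum segment by segment, stopping at the largest checkpoint.
import Mathlib
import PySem

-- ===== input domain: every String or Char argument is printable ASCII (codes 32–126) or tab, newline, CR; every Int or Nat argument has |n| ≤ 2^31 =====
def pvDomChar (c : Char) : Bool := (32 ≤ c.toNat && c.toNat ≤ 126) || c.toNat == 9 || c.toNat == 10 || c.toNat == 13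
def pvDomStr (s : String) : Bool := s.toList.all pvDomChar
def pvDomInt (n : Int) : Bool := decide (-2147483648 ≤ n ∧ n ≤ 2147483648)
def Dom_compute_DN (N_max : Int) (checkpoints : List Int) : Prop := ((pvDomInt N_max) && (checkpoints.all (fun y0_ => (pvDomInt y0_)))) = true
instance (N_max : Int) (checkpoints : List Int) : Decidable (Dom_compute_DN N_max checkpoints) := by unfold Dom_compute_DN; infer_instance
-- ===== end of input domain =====

-- B sorts the distinct in-range checkpoints and computes the running max segment by segment,
-- stopping at the largest checkpoint instead of scanning every n up to N_max with a per-n set test (objective: alternative).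

-- ===== PORT A =====
-- Shared helper (both Pythons contain this identical function). The Python while loop is
-- ported with a fuel bound of 100000, far above any Collatz stopping time reachable here;
-- both ports only ever call it on n ≥ 1, where the Python loop terminates within the fuel.
def stGo : Nat → Int → Int → Int
  | 0, _, count => count
  | fuel + 1, n, count =>
    if n ≠ 1 then
      (if PySem.Int.mod n 2 = 0 then stGo fuel (PySem.Int.floordiv n 2) (count + 1)
       else stGo fuel (3 * n + 1) (count + 1))
    else count

def stopping_time (n : Int) : Int := stGo 100000 n 0

def compute_DN (N_max : Int) (checkpoints : List Int) : List (Int × Int) :=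
  let cp_set := PySem.Set.ofList checkpoints
  let r := (PySem.List.pyRange 1 (N_max + 1) 1).foldl
    (fun (s : PySem.Dict Int Int × Int) n =>
      let st := stopping_time n
      let current_max_st := if st > s.2 then st else s.2
      (if PySem.Set.contains cp_set n then s.1.insert n current_max_st else s.1,
       current_max_st))
    (PySem.Dict.empty, 0)
  r.1.items

-- ===== PORT B =====
def compute_DN_alt (N_max : Int) (checkpoints : List Int) : List (Int × Int) :=
  let cps := PySem.List.sorted
    (PySem.Set.ofList (checkpoints.filter (fun c => decide (1 ≤ c) && decide (c ≤ N_max))))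
    (fun x => x) false
  let r := cps.foldl
    (fun (s : PySem.Dict Int Int × Int × Int) c =>
      let cur := (PySem.List.pyRange s.2.1 (c + 1) 1).foldl
        (fun cur n => let st := stopping_time n; if st > cur then st else cur) s.2.2
      (s.1.insert c cur, c + 1, cur))
    (PySem.Dict.empty, 1, 0)
  r.1.items

-- ===== PRECONDITION & SPEC =====
def Spec_compute_DN (N_max : Int) (checkpoints : List Int) (out : List (Int × Int)) : Prop := out = compute_DN_alt N_max checkpoints
instance (N_max : Int) (checkpoints : List Int) (out : List (Int × Int)) : Decidable (Spec_compute_DN N_max checkpoints out) := by unfold Spec_compute_DN; infer_instance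

-- ===== CLAIM (what is proved, stated in full; the proofs are below) =====
def Claim_equal_compute_DN : Prop := ∀ (N_max : Int) (checkpoints : List Int), Dom_compute_DN N_max checkpoints → Spec_compute_DN N_max checkpoints (compute_DN N_max checkpoints)

-- ===== LEMMAS AND PROOFS =====

/-- The running-max update both loops perform. -/
def pvStep (cur n : Int) : Int :=
  let st := stopping_time n
  if st > cur then st else cur

/-- What A's single loop records: walk the list, thread the running max, emit at members. -/
def pvF (mem : Int → Bool) : List Int → Int → List (Int × Int)
  | [], _ => []
  | n :: L, cur => (if mem n then [(n, pvStep cur n)] else []) ++ pvF mem L (pvStep cur n)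

/-- What B's segment loop records. -/
def pvG : List Int → Int → Int → List (Int × Int)
  | [], _, _ => []
  | c :: cs, prev, cur =>
    let cur' := (PySem.List.pyRange prev (c + 1) 1).foldl pvStep cur
    (c, cur') :: pvG cs (c + 1) cur'

theorem pvA_loop (cp : PySem.Set Int) (L : List Int) (d : PySem.Dict Int Int) (cur : Int)
    (hL : L.Nodup) (hd : ∀ n ∈ L, d.contains n = false) :
    L.foldl
      (fun (s : PySem.Dict Int Int × Int) n =>
        let st := stopping_time n
        let current_max_st := if st > s.2 then st else s.2
        (if PySem.Set.contains cp n then s.1.insert n current_max_st else s.1,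
         current_max_st))
      (d, cur)
    = (PySem.Dict.mk (d.items ++ pvF (fun n => PySem.Set.contains cp n) L cur),
       L.foldl pvStep cur) := by
  induction L generalizing d cur with
  | nil => simp [pvF]
  | cons n L ih =>
    simp only [List.foldl_cons, List.nodup_cons] at *
    rw [show (if stopping_time n > cur then stopping_time n else cur) = pvStep cur n from rfl]
    by_cases hm : PySem.Set.contains cp n
    · rw [if_pos hm]
      rw [ih (d.insert n (pvStep cur n)) (pvStep cur n) hL.2 ?_]
      · have hit : (d.insert n (pvStep cur n)).items = d.items ++ [(n, pvStep cur n)] :=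
          PySem.Dict.items_insert_of_not_contains _ _ (hd n (List.mem_cons_self ..))
        rw [hit]
        have hm' : n ∈ cp := by simpa using hm
        simp [pvF, hm']
      · intro m hmL
        rw [PySem.Dict.contains_insert]
        have hne : m ≠ n := fun h => hL.1 (h ▸ hmL)
        simp [hne, hd m (List.mem_cons_of_mem _ hmL)]
    · rw [if_neg hm]
      rw [ih d (pvStep cur n) hL.2 (fun m hmL => hd m (List.mem_cons_of_mem _ hmL))]
      have hm' : n ∉ cp := by simpa using hm
      simp [pvF, hm']

theorem pvB_loop (cps : List Int) (d : PySem.Dict Int Int) (prev cur : Int)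
    (hnd : cps.Nodup) (hd : ∀ c ∈ cps, d.contains c = false) :
    (cps.foldl
      (fun (s : PySem.Dict Int Int × Int × Int) c =>
        let cur := (PySem.List.pyRange s.2.1 (c + 1) 1).foldl
          (fun cur n => let st := stopping_time n; if st > cur then st else cur) s.2.2
        (s.1.insert c cur, c + 1, cur))
      (d, prev, cur)).1.items
    = d.items ++ pvG cps prev cur := by
  induction cps generalizing d prev cur with
  | nil => simp [pvG]
  | cons c cs ih =>
    simp only [List.foldl_cons, List.nodup_cons] at *
    rw [show ((PySem.List.pyRange prev (c + 1) 1).foldl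
        (fun cur n => let st := stopping_time n; if st > cur then st else cur) cur)
        = (PySem.List.pyRange prev (c + 1) 1).foldl pvStep cur from rfl]
    rw [ih (d.insert c ((PySem.List.pyRange prev (c + 1) 1).foldl pvStep cur)) (c + 1)
        ((PySem.List.pyRange prev (c + 1) 1).foldl pvStep cur) hnd.2 ?_]
    · have hit : (d.insert c ((PySem.List.pyRange prev (c + 1) 1).foldl pvStep cur)).items
          = d.items ++ [(c, (PySem.List.pyRange prev (c + 1) 1).foldl pvStep cur)] :=
        PySem.Dict.items_insert_of_not_contains _ _ (hd c (List.mem_cons_self ..))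
      rw [hit]
      simp [pvG]
    · intro m hm
      rw [PySem.Dict.contains_insert]
      have hne : m ≠ c := fun h => hnd.1 (h ▸ hm)
      simp [hne, hd m (List.mem_cons_of_mem _ hm)]

theorem pvG_shift (cs : List Int) (a cur : Int) (h : ∀ c ∈ cs, a ≤ c) :
    pvG cs a cur = pvG cs (a + 1) (pvStep cur a) := by
  cases cs with
  | nil => rfl
  | cons c cs =>
    have ha : a < c + 1 := by have := h c (List.mem_cons_self ..); omega
    simp only [pvG]
    rw [PySem.List.pyRange_one_cons ha, List.foldl_cons]

theorem pvFG (k : Nat) : ∀ (a b cur : Int) (mem : Int → Bool), (b - a).toNat = k →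
    pvF mem (PySem.List.pyRange a b 1) cur
      = pvG ((PySem.List.pyRange a b 1).filter mem) a cur := by
  induction k with
  | zero =>
    intro a b cur mem hk
    have hba : b ≤ a := by omega
    rw [PySem.List.pyRange_one_eq_nil hba]
    rfl
  | succ k ih =>
    intro a b cur mem hk
    have hab : a < b := by omega
    rw [PySem.List.pyRange_one_cons hab]
    have hk' : (b - (a + 1)).toNat = k := by omega
    simp only [pvF, List.filter_cons]
    by_cases hm : mem a
    · rw [if_pos hm, if_pos hm]
      simp only [pvG]
      rw [show ((PySem.List.pyRange a (a + 1) 1).foldl pvStep cur) = pvStep cur a from by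
        rw [PySem.List.pyRange_one_singleton]; rfl]
      simp only [List.singleton_append]
      rw [ih (a + 1) b (pvStep cur a) mem hk']
    · rw [if_neg hm, if_neg hm]
      simp only [List.nil_append]
      rw [pvG_shift _ a cur ?_, ih (a + 1) b (pvStep cur a) mem hk']
      intro c hc
      have h1 := (List.mem_filter.mp hc).1
      have h2 := (PySem.List.mem_pyRange_one.mp h1).1
      omega

/-- B's sorted distinct in-range checkpoints are exactly A's range filtered by membership. -/
theorem pvCps_eq (N_max : Int) (checkpoints : List Int) :
    PySem.List.sorted
      (PySem.Set.ofList (checkpoints.filter (fun c => decide (1 ≤ c) && decide (c ≤ N_max))))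
      (fun x => x) false
    = (PySem.List.pyRange 1 (N_max + 1) 1).filter
        (fun n => PySem.Set.contains (PySem.Set.ofList checkpoints) n) := by
  apply PySem.List.sorted_eq_of_perm_of_pairwise_lt
  · rw [List.perm_ext_iff_of_nodup]
    · intro x
      simp only [List.mem_filter, PySem.Set.mem_ofList, PySem.List.mem_pyRange_one,
        Bool.and_eq_true, decide_eq_true_eq]
      constructor
      · rintro ⟨⟨h1, h2⟩, hx⟩
        have hx' : x ∈ checkpoints := by simpa using hx
        exact ⟨hx', h1, by omega⟩
      · rintro ⟨hx, h1, h2⟩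
        exact ⟨⟨h1, by omega⟩, by simpa using hx⟩
    · exact List.Nodup.filter _ (PySem.List.nodup_pyRange_one _ _)
    · exact PySem.Set.nodup_ofList _
  · exact List.Pairwise.filter _ (PySem.List.pairwise_lt_pyRange_one _ _)

-- ===== VERDICT (by name: the statement is the Claim_ definition above) =====
theorem compute_DN_spec : Claim_equal_compute_DN := by
  intro N_max checkpoints _
  unfold Spec_compute_DN compute_DN compute_DN_alt
  dsimp only
  rw [pvA_loop _ _ _ _ (PySem.List.nodup_pyRange_one _ _) (fun n _ => rfl)]
  rw [pvB_loop _ _ _ _ ?_ (fun c _ => rfl)]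
  · dsimp only
    rw [pvCps_eq]
    have : PySem.Dict.empty.items = ([] : List (Int × Int)) := rfl
    rw [this, List.nil_append, List.nil_append]
    exact pvFG ((N_max + 1) - 1).toNat 1 (N_max + 1) 0 _ rfl
  · exact ((PySem.List.sorted_perm _ _ _).nodup_iff).mpr (PySem.Set.nodup_ofList _)
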